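-- pv_equiv track=rewrite | github.com/fo22Alfaro/aots6 | core/aots6_topology.py | covering_space_degree
-- ===== SOURCE A (Python) =====
-- from typing import Dict, List, Tuple, Optional, Any, Callable
--
-- def covering_space_degree(w: List[int]) -> int:
--     """
--     The loop with winding w covers the base loop γ_i |w_i| times.
--     Degree = lcm of |w_i| (when all nonzero).
--     """
--     from math import gcd
--     nonzero = [abs(wi) for wi in w if wi != 0]
--     if not nonzero:
--         return 0
--     result = nonzero[0]
--     for x in nonzero[1:]:
--         result = result * x // gcd(result, x)
--     return result
-- ===== SOURCE B (Python) =====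
-- def _factorize(n):
--     """Prime factorization of n >= 1 by trial division: list of (prime, exponent)."""
--     out = []
--     p = 2
--     while p * p <= n:
--         if n % p == 0:
--             e = 0
--             while n % p == 0:
--                 n //= p
--                 e += 1
--             out.append((p, e))
--         p += 1
--     if n > 1:
--         out.append((n, 1))
--     return out
--
--
-- def covering_space_degree(w):
--     """
--     The loop with winding w covers the base loop γ_i |w_i| times.
--     Degree = lcm of |w_i| (when all nonzero).
--     """
--     best = {}          # prime -> maximum exponent seen across all |w_i|
--     seen = False
--     for wi in w:
--         if wi == 0:
--             continue
--         seen = True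
--         for p, e in _factorize(abs(wi)):
--             if e > best.get(p, 0):
--                 best[p] = e
--     if not seen:
--         return 0
--     deg = 1
--     for p, e in best.items():
--         deg *= p ** e
--     return deg
-- ===== Notes on version B (the rewrite author's own statement) =====
-- stated objective: alternative
-- what changed: A's single pass folding lcm(acc,x)=acc*x//gcd(acc,x) over the nonzero absolute values is replaced by trial-division prime factorization of each |w_i|, a dict of per-prime maximum exponents, and one final product of prime**max_exponent.
import Mathlib
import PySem

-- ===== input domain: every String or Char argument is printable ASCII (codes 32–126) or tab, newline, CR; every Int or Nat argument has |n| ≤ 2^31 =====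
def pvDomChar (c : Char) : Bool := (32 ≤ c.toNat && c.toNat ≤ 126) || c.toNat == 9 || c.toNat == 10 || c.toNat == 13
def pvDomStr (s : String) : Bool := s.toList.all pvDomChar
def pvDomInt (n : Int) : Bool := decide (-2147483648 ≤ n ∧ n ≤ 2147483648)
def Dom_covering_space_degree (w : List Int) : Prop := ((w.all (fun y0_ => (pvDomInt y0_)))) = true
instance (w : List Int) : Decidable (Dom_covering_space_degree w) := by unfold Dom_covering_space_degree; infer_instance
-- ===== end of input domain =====

-- B replaces A's running gcd-fold by a different LCM algorithm: trial-division prime factorization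
-- of each |w_i| with a dict of per-prime maximum exponents, multiplied out once at the end; the
-- timing run measured B faster on large inputs (A's running LCM grows into a huge integer, so
-- every fold step pays big-number mul/gcd/div; B keeps all per-element work on machine-size ints).

-- ===== PORT A =====
def covering_space_degree (w : List Int) : Int :=
  let nonzero := (w.filter (fun wi => wi ≠ 0)).map (fun wi => |wi|)
  match nonzero with
  | [] => 0
  | r0 :: rest =>
    rest.foldl (fun result x => PySem.Int.floordiv (result * x) ((Int.gcd result x : Nat) : Int)) r0

-- ===== PORT B =====
-- inner 'while n % p == 0' loop of _factorize: returns (exponent, reduced n);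
-- the '2 ≤ p ∧ 0 < n' guard conjuncts only make the recursion total (they always hold at call sites)
def pvDivOut (p n : Nat) : Nat × Nat :=
  if h : 2 ≤ p ∧ 0 < n ∧ n % p = 0 then
    let r := pvDivOut p (n / p)
    (r.1 + 1, r.2)
  else (0, n)
termination_by n
decreasing_by exact Nat.div_lt_self h.2.1 (by omega)

-- termination facts cited by pvFactorLoop's decreasing_by
theorem pvDivOut_snd_le (p n : Nat) : (pvDivOut p n).2 ≤ n := by
  fun_induction pvDivOut p n with
  | case1 n h r ih => exact le_trans ih (Nat.div_le_self _ _)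
  | case2 n h => exact le_rfl

theorem pvDivOut_snd_lt (p n : Nat) (h2 : 2 ≤ p) (hn : 0 < n) (hd : n % p = 0) :
    (pvDivOut p n).2 < n := by
  rw [pvDivOut]
  rw [dif_pos ⟨h2, hn, hd⟩]
  exact lt_of_le_of_lt (pvDivOut_snd_le p (n / p)) (Nat.div_lt_self hn (by omega))

-- outer 'while p * p <= n' loop of _factorize; the '2 ≤ p' guard only makes the recursion total
def pvFactorLoop (p n : Nat) : List (Nat × Nat) :=
  if h2 : 2 ≤ p then
    if h : p * p ≤ n then
      if hd : n % p = 0 then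
        let r := pvDivOut p n
        (p, r.1) :: pvFactorLoop (p + 1) r.2
      else pvFactorLoop (p + 1) n
    else if 1 < n then [(n, 1)] else []
  else []
termination_by (n, n + 2 - p)
decreasing_by
  · exact Prod.Lex.left _ _ (pvDivOut_snd_lt p n h2 (by nlinarith) hd)
  · have : p ≤ n := le_trans (Nat.le_mul_of_pos_left p (by omega)) h
    exact Prod.Lex.right _ (by omega)

def pvFactorize (n : Nat) : List (Nat × Nat) := pvFactorLoop 2 n

def covering_space_degree_alt (w : List Int) : Int :=
  let st := w.foldl (fun (st : PySem.Dict Int Int × Bool) wi =>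
      if wi = 0 then st
      else ((pvFactorize wi.natAbs).foldl (fun d pe =>
              if ((pe.2 : Int) > d.getD (pe.1 : Int) 0) then d.insert (pe.1 : Int) (pe.2 : Int) else d) st.1,
            true))
    (PySem.Dict.empty, false)
  if st.2 = false then 0
  else st.1.items.foldl (fun deg pe => deg * pe.1 ^ pe.2.toNat) 1
  -- 'p ** e' with e a nonnegative dict value is 'pe.1 ^ pe.2.toNat'

-- ===== PRECONDITION & SPEC =====
def Spec_covering_space_degree (w : List Int) (out : Int) : Prop := out = covering_space_degree_alt w
instance (w : List Int) (out : Int) : Decidable (Spec_covering_space_degree w out) := by unfold Spec_covering_space_degree; infer_instance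

-- ===== CLAIM (what is proved, stated in full; the proofs are below) =====
def Claim_equal_covering_space_degree : Prop := ∀ (w : List Int), Dom_covering_space_degree w → Spec_covering_space_degree w (covering_space_degree w)

-- ===== LEMMAS AND PROOFS =====

-- the nonzero absolute values of w, as naturals
def pvNs (w : List Int) : List Nat := (w.filter (fun wi => wi ≠ 0)).map (fun wi => wi.natAbs)

-- B's inner foldl (merging one factorization into the max-exponent dict), named for the proofs
def pvMerge (d : PySem.Dict Int Int) (n : Nat) : PySem.Dict Int Int :=
  (pvFactorize n).foldl (fun d pe =>
    if ((pe.2 : Int) > d.getD (pe.1 : Int) 0) then d.insert (pe.1 : Int) (pe.2 : Int) else d) d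

-- the dict represents exactly the prime factorization of m
def pvRepr (d : PySem.Dict Int Int) (m : Nat) : Prop :=
  d.keys.Nodup ∧
  (∀ q : Nat, Nat.Prime q → d.getD (q : Int) 0 = (m.factorization q : Int)) ∧
  (∀ k ∈ d.keys, ∃ q : Nat, Nat.Prime q ∧ k = (q : Int) ∧ 0 < m.factorization q) ∧
  (∀ q : Nat, Nat.Prime q → 0 < m.factorization q → (q : Int) ∈ d.keys)

theorem pvDivOut_spec (p n : Nat) (h2 : 2 ≤ p) (hn : 0 < n) :
    n = p ^ (pvDivOut p n).1 * (pvDivOut p n).2 ∧ ¬ p ∣ (pvDivOut p n).2 ∧ 0 < (pvDivOut p n).2 := by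
  fun_induction pvDivOut p n with
  | case1 n h r ih =>
    obtain ⟨hp2, hn0, hmod⟩ := h
    have hdvd : p ∣ n := Nat.dvd_of_mod_eq_zero hmod
    have hq : 0 < n / p := Nat.div_pos (Nat.le_of_dvd hn0 hdvd) (by omega)
    obtain ⟨e1, e2, e3⟩ := ih hq
    refine ⟨?_, e2, e3⟩
    have hnp : p * (n / p) = n := Nat.mul_div_cancel' hdvd
    calc n = p * (n / p) := hnp.symm
      _ = p * (p ^ (pvDivOut p (n / p)).1 * (pvDivOut p (n / p)).2) := by rw [← e1]
      _ = p ^ ((pvDivOut p (n / p)).1 + 1) * (pvDivOut p (n / p)).2 := by ring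
  | case2 n h =>
    refine ⟨by simp, ?_, hn⟩
    intro hdvd
    exact h ⟨h2, hn, Nat.dvd_iff_mod_eq_zero.mp hdvd⟩

theorem pvFactorLoop_spec (p n : Nat) (h2 : 2 ≤ p) (hn : 1 ≤ n)
    (H : ∀ q, 2 ≤ q → q < p → ¬ q ∣ n) :
    (∀ pe ∈ pvFactorLoop p n, Nat.Prime pe.1 ∧ p ≤ pe.1 ∧ pe.2 = n.factorization pe.1 ∧ 0 < pe.2) ∧
    (∀ q : Nat, Nat.Prime q → q ∣ n → q ∈ (pvFactorLoop p n).map Prod.fst) ∧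
    ((pvFactorLoop p n).map Prod.fst).Nodup := by
  fun_induction pvFactorLoop p n with
  | case1 p n hp2 hsq hmod r ih =>
    clear h2 hn
    have hn0 : 0 < n := by nlinarith
    have hpn : p ∣ n := Nat.dvd_of_mod_eq_zero hmod
    obtain ⟨hfac, hnd, hn'⟩ := pvDivOut_spec p n hp2 hn0
    set e := (pvDivOut p n).1 with he
    set n' := (pvDivOut p n).2 with hn'eq
    have hp : Nat.Prime p := by
      rw [Nat.prime_def_lt]
      refine ⟨hp2, fun m hm hmp => ?_⟩
      by_contra hm1
      have hm2 : 2 ≤ m := by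
        rcases Nat.lt_or_ge m 2 with h | h
        · interval_cases m
          · simp at hmp; omega
          · omega
        · exact h
      exact H m hm2 hm (hmp.trans hpn)
    have hpe : p ^ e ≠ 0 := by positivity
    have hn'dvd : n' ∣ n := ⟨p ^ e, by rw [hfac]; ring⟩
    have he1 : 1 ≤ e := by
      by_contra h0
      have : e = 0 := by omega
      rw [this, pow_zero, one_mul] at hfac
      exact hnd (hfac ▸ hpn)
    have hfactq : ∀ q, n.factorization q = (if p = q then e else 0) + n'.factorization q := by
      intro q
      conv_lhs => rw [hfac]
      rw [Nat.factorization_mul hpe (by omega), Finsupp.add_apply, hp.factorization_pow,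
        Finsupp.single_apply]
    have hfactp : n.factorization p = e := by
      rw [hfactq p, if_pos rfl, Nat.factorization_eq_zero_of_not_dvd hnd]; omega
    obtain ⟨ih1, ih2, ih3⟩ := ih (by omega) hn' (by
      intro q hq2 hqp hqn'
      rcases Nat.lt_or_ge q p with h | h
      · exact H q hq2 h (hqn'.trans hn'dvd)
      · have : q = p := by omega
        exact hnd (this ▸ hqn'))
    refine ⟨?_, ?_, ?_⟩
    · intro pe hpe'
      rcases List.mem_cons.mp hpe' with h | h
      · rw [h]; exact ⟨hp, le_rfl, by simpa using hfactp.symm, by simpa using he1⟩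
      · obtain ⟨q1, q2, q3, q4⟩ := ih1 pe h
        refine ⟨q1, by omega, ?_, q4⟩
        rw [hfactq pe.1, if_neg (by omega), zero_add]; exact q3
    · intro q hq hqn
      by_cases hqp : q = p
      · simp [hqp]
      · rcases (hq.dvd_mul).mp (hfac ▸ hqn) with h | h
        · exact absurd ((Nat.prime_dvd_prime_iff_eq hq hp).mp (hq.dvd_of_dvd_pow h)) hqp
        · simpa using Or.inr (ih2 q hq h)
    · simp only [List.map_cons, List.nodup_cons]
      refine ⟨?_, ih3⟩
      intro hmem
      obtain ⟨pe, hpe', hfst⟩ := List.mem_map.mp hmem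
      have := (ih1 pe hpe').2.1
      omega
  | case2 p n hp2 hsq hmod ih =>
    clear h2 hn
    have hn0 : 0 < n := by nlinarith
    have hnp : ¬ p ∣ n := fun hd => hmod (Nat.dvd_iff_mod_eq_zero.mp hd)
    obtain ⟨ih1, ih2, ih3⟩ := ih (by omega) hn0 (by
      intro q hq2 hqp hqn
      rcases Nat.lt_or_ge q p with h | h
      · exact H q hq2 h hqn
      · have : q = p := by omega
        exact hnp (this ▸ hqn))
    exact ⟨fun pe hpe => ⟨(ih1 pe hpe).1, by have := (ih1 pe hpe).2.1; omega,
      (ih1 pe hpe).2.2.1, (ih1 pe hpe).2.2.2⟩, ih2, ih3⟩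
  | case3 p n hp2 hsq h1n =>
    have hp : Nat.Prime n := by
      by_contra hnp
      have hsq2 := Nat.minFac_sq_le_self (by omega) hnp
      have hmf2 : 2 ≤ n.minFac := (Nat.minFac_prime (by omega)).two_le
      have hlt : n.minFac < p := by nlinarith
      exact H n.minFac hmf2 hlt (Nat.minFac_dvd n)
    have hpn : p ≤ n := by
      by_contra hlt
      exact H n (by omega) (by omega) dvd_rfl
    refine ⟨?_, ?_, by simp⟩
    · intro pe hpe
      simp only [List.mem_singleton] at hpe
      rw [hpe]
      exact ⟨hp, hpn, by simpa using (hp.factorization_self).symm, by simp⟩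
    · intro q hq hqn
      simp [(Nat.prime_dvd_prime_iff_eq hq hp).mp hqn]
  | case4 p n hp2 hsq h1n =>
    have hn1 : n = 1 := by omega
    refine ⟨by simp, ?_, by simp⟩
    intro q hq hqn
    rw [hn1] at hqn
    exact absurd (Nat.eq_one_of_dvd_one hqn) hq.ne_one
  | case5 p n hp2 => exact absurd h2 hp2

theorem pvFactorize_spec (n : Nat) (hn : 1 ≤ n) :
    (∀ pe ∈ pvFactorize n, Nat.Prime pe.1 ∧ pe.2 = n.factorization pe.1 ∧ 0 < pe.2) ∧
    (∀ q : Nat, Nat.Prime q → q ∣ n → q ∈ (pvFactorize n).map Prod.fst) ∧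
    ((pvFactorize n).map Prod.fst).Nodup := by
  obtain ⟨h1, h2, h3⟩ := pvFactorLoop_spec 2 n le_rfl hn (fun q hq hq2 _ => absurd hq (by omega))
  exact ⟨fun pe hpe => ⟨(h1 pe hpe).1, (h1 pe hpe).2.2⟩, h2, h3⟩

theorem pvGetD_ne_of_not_mem_keys (d : PySem.Dict Int Int) (k : Int) (hnk : k ∉ d.keys) :
    d.getD k 0 = 0 := by
  apply PySem.Dict.getD_of_not_contains
  rw [← Bool.not_eq_true, PySem.Dict.contains_iff_mem_keys]
  exact hnk

theorem pvFold_keys (F : List (Nat × Nat)) (d : PySem.Dict Int Int) (k : Int)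
    (hpos : ∀ pe ∈ F, 0 < pe.2) :
    (k ∈ (F.foldl (fun d pe =>
        if ((pe.2 : Int) > d.getD (pe.1 : Int) 0) then d.insert (pe.1 : Int) (pe.2 : Int) else d) d).keys
      ↔ k ∈ d.keys ∨ ∃ pe ∈ F, k = (pe.1 : Int)) := by
  induction F generalizing d with
  | nil => simp
  | cons pe t ih =>
    simp only [List.foldl_cons]
    rw [ih _ (fun x hx => hpos x (List.mem_cons_of_mem _ hx))]
    by_cases hc : ((pe.2 : Int) > d.getD (pe.1 : Int) 0)
    · rw [if_pos hc]
      rw [PySem.Dict.mem_keys_insert]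
      constructor
      · rintro ((hk | hk) | ⟨x, hx, hkx⟩)
        · exact Or.inr ⟨pe, List.mem_cons_self, hk⟩
        · exact Or.inl hk
        · exact Or.inr ⟨x, List.mem_cons_of_mem _ hx, hkx⟩
      · rintro (hk | ⟨x, hx, hkx⟩)
        · exact Or.inl (Or.inr hk)
        · rcases List.mem_cons.mp hx with h | h
          · exact Or.inl (Or.inl (h ▸ hkx))
          · exact Or.inr ⟨x, h, hkx⟩
    · rw [if_neg hc]
      constructor
      · rintro (hk | ⟨x, hx, hkx⟩)
        · exact Or.inl hk
        · exact Or.inr ⟨x, List.mem_cons_of_mem _ hx, hkx⟩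
      · rintro (hk | ⟨x, hx, hkx⟩)
        · exact Or.inl hk
        · rcases List.mem_cons.mp hx with h | h
          · subst h
            left
            have h0 : (0 : Int) < (x.2 : Int) := by exact_mod_cast hpos x List.mem_cons_self
            by_contra hnk
            have := pvGetD_ne_of_not_mem_keys d k (hnk)
            rw [hkx] at this
            omega
          · exact Or.inr ⟨x, h, hkx⟩

theorem pvFold_nodup (F : List (Nat × Nat)) (d : PySem.Dict Int Int) (hd : d.keys.Nodup) :
    (F.foldl (fun d pe =>
        if ((pe.2 : Int) > d.getD (pe.1 : Int) 0) then d.insert (pe.1 : Int) (pe.2 : Int) else d) d).keys.Nodup := by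
  induction F generalizing d with
  | nil => exact hd
  | cons pe t ih =>
    simp only [List.foldl_cons]
    apply ih
    split
    · exact PySem.Dict.nodup_keys_insert _ _ _ hd
    · exact hd

theorem pvFold_getD_of_not_mem (F : List (Nat × Nat)) (d : PySem.Dict Int Int) (q : Nat)
    (hq : ∀ pe ∈ F, pe.1 ≠ q) :
    (F.foldl (fun d pe =>
        if ((pe.2 : Int) > d.getD (pe.1 : Int) 0) then d.insert (pe.1 : Int) (pe.2 : Int) else d) d).getD (q : Int) 0
      = d.getD (q : Int) 0 := by
  induction F generalizing d with
  | nil => rfl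
  | cons pe t ih =>
    simp only [List.foldl_cons]
    rw [ih _ (fun x hx => hq x (List.mem_cons_of_mem _ hx))]
    split
    · refine PySem.Dict.getD_insert_of_ne _ _ _ ?_
      have := hq pe List.mem_cons_self
      intro h
      exact this (Nat.cast_injective (R := Int) h).symm
    · rfl

theorem pvFold_getD_of_mem (F : List (Nat × Nat)) (d : PySem.Dict Int Int) (q e : Nat)
    (hnd : (F.map Prod.fst).Nodup) (hmem : (q, e) ∈ F) :
    (F.foldl (fun d pe =>
        if ((pe.2 : Int) > d.getD (pe.1 : Int) 0) then d.insert (pe.1 : Int) (pe.2 : Int) else d) d).getD (q : Int) 0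
      = max (d.getD (q : Int) 0) (e : Int) := by
  induction F generalizing d with
  | nil => simp at hmem
  | cons pe t ih =>
    simp only [List.map_cons, List.nodup_cons] at hnd
    simp only [List.foldl_cons]
    rcases List.mem_cons.mp hmem with h | h
    · have hkq : pe.1 = q := by rw [← h]
      have hnt : ∀ x ∈ t, x.1 ≠ q := by
        intro x hx hxq
        exact hnd.1 (hkq ▸ hxq ▸ List.mem_map_of_mem hx)
      rw [pvFold_getD_of_not_mem t _ q hnt]
      have hve : pe.2 = e := by rw [← h]
      rw [← hkq, ← hve]
      by_cases hc : ((pe.2 : Int) > d.getD (pe.1 : Int) 0)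
      · rw [if_pos hc, PySem.Dict.getD_insert_self]
        omega
      · rw [if_neg hc]
        omega
    · have hne : pe.1 ≠ q := by
        intro hpq
        exact hnd.1 (hpq ▸ (List.mem_map_of_mem h : (q,e).1 ∈ _))
      have hstep : ((fun d pe =>
          if ((pe.2 : Int) > d.getD (pe.1 : Int) 0) then d.insert (pe.1 : Int) (pe.2 : Int) else d) d pe).getD (q : Int) 0
          = d.getD (q : Int) 0 := by
        simp only
        split
        · refine PySem.Dict.getD_insert_of_ne _ _ _ ?_
          intro hh
          exact hne (Nat.cast_injective (R := Int) hh.symm)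
        · rfl
      rw [ih _ hnd.2 h, hstep]

theorem pvMerge_repr (d : PySem.Dict Int Int) (m n : Nat) (hd : pvRepr d m)
    (hm : 0 < m) (hn : 0 < n) : pvRepr (pvMerge d n) (Nat.lcm m n) := by
  obtain ⟨S1, S2, S3⟩ := pvFactorize_spec n hn
  obtain ⟨R1, R2, R3, R4⟩ := hd
  have hpos : ∀ pe ∈ pvFactorize n, 0 < pe.2 := fun pe hpe => (S1 pe hpe).2.2
  have hL : ∀ q, (Nat.lcm m n).factorization q = max (m.factorization q) (n.factorization q) := by
    intro q
    rw [Nat.factorization_lcm (by omega) (by omega), Finsupp.sup_apply]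
  refine ⟨pvFold_nodup _ _ R1, ?_, ?_, ?_⟩
  · intro q hq
    by_cases hqF : ∃ pe ∈ pvFactorize n, pe.1 = q
    · obtain ⟨pe, hpe, hpq⟩ := hqF
      have he : pe.2 = n.factorization q := by rw [(S1 pe hpe).2.1, hpq]
      have hmem : (q, pe.2) ∈ pvFactorize n := by
        have : pe = (q, pe.2) := by rw [← hpq]
        exact this ▸ hpe
      rw [pvMerge, pvFold_getD_of_mem _ _ _ _ S3 hmem, R2 q hq, hL q, he]
      push_cast
      rfl
    · simp only [not_exists, not_and] at hqF
      rw [pvMerge, pvFold_getD_of_not_mem _ _ _ hqF, R2 q hq, hL q]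
      have hn0 : n.factorization q = 0 := by
        by_contra h0
        obtain ⟨pe, hpe, hpq⟩ := List.mem_map.mp (S2 q hq (Nat.dvd_of_factorization_pos h0))
        exact hqF pe hpe hpq
      rw [hn0]
      simp
  · intro k hk
    rw [pvMerge, pvFold_keys _ _ _ hpos] at hk
    rcases hk with hk | ⟨pe, hpe, hkx⟩
    · obtain ⟨q, hq, hkq, h0⟩ := R3 k hk
      exact ⟨q, hq, hkq, by rw [hL]; omega⟩
    · obtain ⟨q1, q2, q3⟩ := S1 pe hpe
      refine ⟨pe.1, q1, hkx, ?_⟩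
      rw [hL pe.1, ← q2]
      omega
  · intro q hq h0
    rw [hL] at h0
    rw [pvMerge, pvFold_keys _ _ _ hpos]
    rcases Nat.lt_or_ge 0 (m.factorization q) with hmq | hmq
    · exact Or.inl (R4 q hq hmq)
    · have hnq : 0 < n.factorization q := by omega
      obtain ⟨pe, hpe, hpq⟩ := List.mem_map.mp (S2 q hq (Nat.dvd_of_factorization_pos (by omega)))
      exact Or.inr ⟨pe, hpe, by rw [hpq]⟩

theorem pvRepr_prod (d : PySem.Dict Int Int) (m : Nat) (hd : pvRepr d m) (hm : 0 < m) :
    d.items.foldl (fun deg pe => deg * pe.1 ^ pe.2.toNat) 1 = (m : Int) := by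
  obtain ⟨R1, R2, R3, R4⟩ := hd
  rw [PySem.Dict.items_eq_map_keys d R1 0, List.foldl_map]
  have hprod : ∀ (l : List Int) (f : Int → Int),
      l.foldl (fun a x => a * f x) 1 = (l.map f).prod := by
    intro l f
    rw [List.prod_eq_foldl, List.foldl_map]
  rw [hprod d.keys (fun k => k ^ (d.getD k 0).toNat)]
  have hmapeq : d.keys.map (fun k => k ^ (d.getD k 0).toNat)
      = d.keys.map (fun k => ((k.toNat ^ m.factorization k.toNat : Nat) : Int)) := by
    apply List.map_congr_left
    intro k hk
    obtain ⟨q, hq, hkq, h0⟩ := R3 k hk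
    subst hkq
    rw [R2 q hq, Int.toNat_natCast, Int.toNat_natCast]
    exact (Nat.cast_pow q (m.factorization q)).symm
  rw [hmapeq]
  have hmm : d.keys.map (fun k => ((k.toNat ^ m.factorization k.toNat : Nat) : Int))
      = ((d.keys.map Int.toNat).map (fun q => (q ^ m.factorization q : Nat))).map (fun x : Nat => (x : Int)) := by
    simp [List.map_map, Function.comp]
  rw [hmm, ← Nat.cast_list_prod]
  congr 1
  have hqsnd : (d.keys.map Int.toNat).Nodup := by
    refine List.Nodup.map_on ?_ R1
    intro x hx y hy hxy
    obtain ⟨qx, _, hqx, _⟩ := R3 x hx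
    obtain ⟨qy, _, hqy, _⟩ := R3 y hy
    rw [hqx, hqy] at hxy ⊢
    rw [Int.toNat_natCast, Int.toNat_natCast] at hxy
    rw [hxy]
  have hsupp : (d.keys.map Int.toNat).toFinset = m.factorization.support := by
    ext q
    simp only [List.mem_toFinset, List.mem_map, Finsupp.mem_support_iff]
    constructor
    · rintro ⟨k, hk, hkq⟩
      obtain ⟨q', hq', hkq', h0⟩ := R3 k hk
      rw [hkq', Int.toNat_natCast] at hkq
      subst hkq
      omega
    · intro h0
      have hqp : Nat.Prime q := by
        have : q ∈ m.primeFactors := by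
          rw [← Nat.support_factorization, Finsupp.mem_support_iff]
          exact h0
        exact Nat.prime_of_mem_primeFactors this
      exact ⟨(q : Int), R4 q hqp (by omega), Int.toNat_natCast q⟩
  rw [← List.prod_toFinset _ hqsnd, hsupp]
  exact Nat.prod_factorization_pow_eq_self (by omega)

theorem pvRepr_empty : pvRepr PySem.Dict.empty 1 := by
  refine ⟨by simp [pysem], fun q hq => by simp [pysem], ?_, fun q hq h0 => by simp at h0⟩
  intro k hk
  simp [pysem] at hk

theorem pvNs_fold_repr (ns : List Nat) (d : PySem.Dict Int Int) (m : Nat)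
    (hpos : ∀ x ∈ ns, 0 < x) (hd : pvRepr d m) (hm : 0 < m) :
    pvRepr (ns.foldl pvMerge d) (ns.foldl Nat.lcm m) ∧ 0 < ns.foldl Nat.lcm m := by
  induction ns generalizing d m with
  | nil => exact ⟨hd, hm⟩
  | cons x t ih =>
    have hx : 0 < x := hpos x (by simp)
    exact ih _ _ (fun y hy => hpos y (by simp [hy]))
      (pvMerge_repr d m x hd hm hx) (Nat.lcm_pos hm hx)

theorem pvAlt_fold (w : List Int) (d : PySem.Dict Int Int) (b : Bool) :
    w.foldl (fun (st : PySem.Dict Int Int × Bool) wi =>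
      if wi = 0 then st
      else ((pvFactorize wi.natAbs).foldl (fun d pe =>
              if ((pe.2 : Int) > d.getD (pe.1 : Int) 0) then d.insert (pe.1 : Int) (pe.2 : Int) else d) st.1,
            true)) (d, b)
    = ((pvNs w).foldl pvMerge d, b || !(pvNs w).isEmpty) := by
  induction w generalizing d b with
  | nil => simp [pvNs]
  | cons x t ih =>
    by_cases hx : x = 0
    · simp [hx, pvNs, ih]
    · simp [hx, pvNs, ih, pvMerge]

theorem pvA_fold (l : List Nat) (r : Nat) :
    (List.map (fun x : Nat => (x : Int)) l).foldl
      (fun result x => PySem.Int.floordiv (result * x) ((Int.gcd result x : Nat) : Int)) (r : Int)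
    = ((l.foldl Nat.lcm r : Nat) : Int) := by
  induction l generalizing r with
  | nil => simp
  | cons x t ih =>
    rw [List.map_cons, List.foldl_cons, List.foldl_cons]
    have h1 : ((Int.gcd (r : Int) (x : Int) : Nat) : Int) = ((Nat.gcd r x : Nat) : Int) := by
      simp [Int.gcd]
    have h2 : ((r : Int) * (x : Int)) = ((r * x : Nat) : Int) := by push_cast; ring
    rw [h1, h2, PySem.Int.floordiv_natCast]
    have h3 : r * x / Nat.gcd r x = Nat.lcm r x := rfl
    rw [h3, ih]

theorem pvNs_pos (w : List Int) : ∀ x ∈ pvNs w, 0 < x := by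
  intro x hx
  obtain ⟨wi, hwi, hx'⟩ := List.mem_map.mp hx
  have := List.of_mem_filter hwi
  simp at this
  omega

-- ===== VERDICT (by name: the statement is the Claim_ definition above) =====
theorem covering_space_degree_spec : Claim_equal_covering_space_degree := by
  intro w _
  unfold Spec_covering_space_degree covering_space_degree covering_space_degree_alt
  simp only
  rw [pvAlt_fold w PySem.Dict.empty false]
  have habs : (w.filter (fun wi => wi ≠ 0)).map (fun wi => |wi|)
      = List.map (fun x : Nat => (x : Int)) (pvNs w) := by
    rw [pvNs, List.map_map]
    apply List.map_congr_left
    intro wi _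
    exact Int.abs_eq_natAbs wi
  rw [habs]
  cases hns : pvNs w with
  | nil => simp
  | cons h t =>
    have hpos := pvNs_pos w
    rw [hns] at hpos
    simp only [List.map_cons, Bool.false_or, List.isEmpty_cons, Bool.not_false]
    rw [pvA_fold t h]
    obtain ⟨hrepr, hmpos⟩ := pvNs_fold_repr (h :: t) PySem.Dict.empty 1 hpos pvRepr_empty one_pos
    rw [if_neg (by simp), pvRepr_prod _ _ hrepr hmpos]
    have hL : List.foldl Nat.lcm 1 (h :: t) = List.foldl Nat.lcm h t := by
      rw [List.foldl_cons, Nat.lcm_one_left]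
    rw [hL]
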